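-- pv_equiv track=rewrite | github.com/pypi-data/pypi-mirror-311 | packages/vitalsqi-toolkit/vitalsqi_toolkit-1.0.1-py3-none-any.whl/vital_sqi/pipeline/pipeline_functions.py | get_decision_segments
-- ===== SOURCE A (Python) =====
-- def map_decision(decision):
--     """
--     Map decision string to integer for processing.
--
--     Parameters
--     ----------
--     decision : str
--         'accept' or 'reject'
--
--     Returns
--     -------
--     int
--         0 for 'accept', 1 for 'reject'
--     """
--     return 0 if decision == "accept" else 1
--
-- def get_decision_segments(segments, decision, reject_decision):
--     """
--     Separate accepted and rejected segments based on decisions.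
--
--     Parameters
--     ----------
--     segments : list
--         List of all segments.
--     decision : list
--         Decisions from SQI evaluation ('accept'/'reject').
--     reject_decision : list
--         Additional rejection criteria.
--
--     Returns
--     -------
--     tuple of lists
--         Accepted and rejected segments.
--     """
--     # Ensure inputs are of the same length
--     if not (len(segments) == len(decision) == len(reject_decision)):
--         raise ValueError(
--             f"Length mismatch: segments={len(segments)}, decision={len(decision)}, reject_decision={len(reject_decision)}"
--         )
--
--     combined_decision = [
--         map_decision(d) or map_decision(r) for d, r in zip(decision, reject_decision)
--     ]
--     accepted = [seg for idx, seg in enumerate(segments) if combined_decision[idx] == 0]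
--     rejected = [seg for idx, seg in enumerate(segments) if combined_decision[idx] == 1]
--     return accepted, rejected
-- ===== SOURCE B (Python) =====
-- def get_decision_segments(segments, decision, reject_decision):
--     if not (len(segments) == len(decision) == len(reject_decision)):
--         raise ValueError(
--             f"Length mismatch: segments={len(segments)}, decision={len(decision)}, reject_decision={len(reject_decision)}"
--         )
--     accepted, rejected = [], []
--     for seg, d, r in zip(segments, decision, reject_decision):
--         if d == "accept" and r == "accept":
--             accepted.append(seg)
--         else:
--             rejected.append(seg)
--     return accepted, rejected
-- ===== Notes on version B (the rewrite author's own statement) =====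
-- stated objective: simpler
-- what changed: Replaced the intermediate combined_decision table plus two enumerate-filter scans with a single pass over zip(segments, decision, reject_decision) appending each segment to accepted or rejected directly (one traversal, no intermediate list).
import Mathlib
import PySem

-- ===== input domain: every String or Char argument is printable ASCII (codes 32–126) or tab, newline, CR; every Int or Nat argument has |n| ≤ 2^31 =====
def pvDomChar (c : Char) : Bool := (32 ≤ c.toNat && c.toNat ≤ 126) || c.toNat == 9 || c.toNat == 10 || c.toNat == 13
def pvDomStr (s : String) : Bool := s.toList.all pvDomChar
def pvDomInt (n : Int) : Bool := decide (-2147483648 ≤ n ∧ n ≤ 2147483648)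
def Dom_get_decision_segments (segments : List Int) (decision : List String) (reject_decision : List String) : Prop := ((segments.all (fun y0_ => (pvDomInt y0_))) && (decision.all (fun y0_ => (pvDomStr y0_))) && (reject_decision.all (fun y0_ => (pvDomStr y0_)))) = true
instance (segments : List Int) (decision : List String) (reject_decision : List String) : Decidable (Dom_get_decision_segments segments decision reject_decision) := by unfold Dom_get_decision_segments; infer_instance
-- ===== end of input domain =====

-- B replaces A's combined-decision table and two enumerate-filter scans with one pass over the zipped triples (simpler decomposition, same O(n) cost).


-- ===== PORT A =====
def map_decision (decision : String) : Int := if decision == "accept" then 0 else 1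

def get_decision_segments (segments : List Int) (decision : List String) (reject_decision : List String) : List Int × List Int :=
  -- combined_decision = [map_decision(d) or map_decision(r) for d, r in zip(decision, reject_decision)]
  let combined_decision : List Int :=
    (decision.zip reject_decision).map (fun p =>
      let a := map_decision p.1
      if a ≠ 0 then a else map_decision p.2)   -- Python 'x or y'
  -- accepted = [seg for idx, seg in enumerate(segments) if combined_decision[idx] == 0]
  let accepted := (PySem.List.enumerate segments 0).filterMap
    (fun p => if (PySem.List.pyGet? combined_decision p.1).getD 1 = 0 then some p.2 else none)
  let rejected := (PySem.List.enumerate segments 0).filterMap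
    (fun p => if (PySem.List.pyGet? combined_decision p.1).getD 0 = 1 then some p.2 else none)
  (accepted, rejected)

-- ===== PORT B =====
-- single pass over the zipped triples, two accumulators (structural recursion = the loop back-to-front)
def altLoop : List Int → List String → List String → List Int × List Int
  | s :: ss, d :: ds, r :: rs =>
    let rest := altLoop ss ds rs
    if d == "accept" && r == "accept" then (s :: rest.1, rest.2) else (rest.1, s :: rest.2)
  | _, _, _ => ([], [])

def get_decision_segments_alt (segments : List Int) (decision : List String) (reject_decision : List String) : List Int × List Int :=
  altLoop segments decision reject_decision

-- ===== PRECONDITION & SPEC =====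
-- A raises ValueError unless all three lists have the same length.
def Pre_get_decision_segments (segments : List Int) (decision : List String) (reject_decision : List String) : Prop :=
  segments.length = decision.length ∧ decision.length = reject_decision.length
instance (segments : List Int) (decision : List String) (reject_decision : List String) : Decidable (Pre_get_decision_segments segments decision reject_decision) := by unfold Pre_get_decision_segments; infer_instance

def pvWitness_get_decision_segments : List Int × List String × List String :=
  ([1, 2, 3], ["accept", "reject", "accept"], ["accept", "accept", "reject"])

def Spec_get_decision_segments (segments : List Int) (decision : List String) (reject_decision : List String) (out : List Int × List Int) : Prop := out = get_decision_segments_alt segments decision reject_decision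
instance (segments : List Int) (decision : List String) (reject_decision : List String) (out : List Int × List Int) : Decidable (Spec_get_decision_segments segments decision reject_decision out) := by unfold Spec_get_decision_segments; infer_instance

-- ===== CLAIM (what is proved, stated in full; the proofs are below) =====
def Claim_equal_get_decision_segments : Prop := ∀ (segments : List Int) (decision : List String) (reject_decision : List String), Dom_get_decision_segments segments decision reject_decision → Pre_get_decision_segments segments decision reject_decision → Spec_get_decision_segments segments decision reject_decision (get_decision_segments segments decision reject_decision)

-- ===== LEMMAS AND PROOFS =====

-- proof-only helper: filter segments by the value of the parallel combined list
def sel (v : Int) : List Int → List Int → List Int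
  | x :: xs, c :: cs => if c = v then x :: sel v xs cs else sel v xs cs
  | _, _ => []

theorem filt_sel (v dflt : Int) : ∀ (xs : List Int) (pre cs : List Int), xs.length = cs.length →
    (PySem.List.enumerate xs (pre.length : Int)).filterMap
      (fun p => if (PySem.List.pyGet? (pre ++ cs) p.1).getD dflt = v then some p.2 else none)
    = sel v xs cs := by
  intro xs
  induction xs with
  | nil => intro pre cs h; simp [PySem.List.enumerate_nil, sel]
  | cons x xs ih =>
    intro pre cs h
    cases cs with
    | nil => simp at h
    | cons c cs =>
      have h1 : PySem.List.pyGet? (pre ++ c :: cs) (pre.length : Int) = some c :=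
        PySem.List.pyGet?_append_length _ _ _
      have h2 : ((pre.length : Int) + 1) = (((pre ++ [c]).length : Nat) : Int) := by
        simp
      have h3 : pre ++ c :: cs = (pre ++ [c]) ++ cs := by simp
      have ih' := ih (pre ++ [c]) cs (by simpa using h)
      simp only [PySem.List.enumerate_cons, List.filterMap_cons, h2, h3, ih']
      by_cases hcv : c = v <;> simp [sel, hcv]

theorem sel_altLoop : ∀ (xs : List Int) (ds rs : List String), xs.length = ds.length → ds.length = rs.length →
    altLoop xs ds rs =
      (sel 0 xs ((ds.zip rs).map (fun p => let a := map_decision p.1; if a ≠ 0 then a else map_decision p.2)),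
       sel 1 xs ((ds.zip rs).map (fun p => let a := map_decision p.1; if a ≠ 0 then a else map_decision p.2))) := by
  intro xs
  induction xs with
  | nil => intro ds rs h1 h2; cases ds <;> simp_all [altLoop, sel]
  | cons x xs ih =>
    intro ds rs h1 h2
    cases ds with
    | nil => simp at h1
    | cons d ds =>
      cases rs with
      | nil => simp at h2
      | cons r rs =>
        have ih' := ih ds rs (by simpa using h1) (by simpa using h2)
        simp only [altLoop, List.zip_cons_cons, List.map_cons, sel, ih']
        by_cases hd : d = "accept" <;> by_cases hr : r = "accept" <;>
          simp [map_decision, hd, hr]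

-- ===== VERDICT (by name: the statement is the Claim_ definition above) =====
theorem get_decision_segments_spec : Claim_equal_get_decision_segments := by
  intro segments decision reject_decision _ hpre
  obtain ⟨h1, h2⟩ := hpre
  unfold Spec_get_decision_segments get_decision_segments get_decision_segments_alt
  have hlen : segments.length = ((decision.zip reject_decision).map
      (fun p => let a := map_decision p.1; if a ≠ 0 then a else map_decision p.2)).length := by
    simp [List.length_zip, h1, h2]
  have hA0 := filt_sel 0 1 segments [] _ hlen
  have hA1 := filt_sel 1 0 segments [] _ hlen
  simp only [List.length_nil, Nat.cast_zero, List.nil_append] at hA0 hA1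
  rw [sel_altLoop segments decision reject_decision h1 h2]
  exact Prod.ext hA0 hA1
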